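-- pv_equiv track=rewrite | github.com/spiresfrc9106/spiresRobot2026 | tools/wpilog_to_csv.py | _build_leaf_fields
-- ===== SOURCE A (Python) =====
-- _PRIM: dict[str, tuple[str, int]] = {
--     "bool":   ("<B", 1),  # stored as uint8
--     "char":   ("<B", 1),
--     "int8":   ("<b", 1),
--     "uint8":  ("<B", 1),
--     "int16":  ("<h", 2),
--     "uint16": ("<H", 2),
--     "int32":  ("<i", 4),
--     "uint32": ("<I", 4),
--     "int64":  ("<q", 8),
--     "uint64": ("<Q", 8),
--     "float":  ("<f", 4),
--     "double": ("<d", 8),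
-- }
--
-- def _build_leaf_fields(
--     type_name: str,
--     schemas: dict[str, list[tuple[str, str, int]]],
--     prefix: str = "",
-- ) -> list[tuple[str, str, int]]:
--     """
--     Recursively expand a type into leaf (path, fmt, byte_size) tuples.
--     path uses '/' as separator, matching AdvantageScope sub-column naming.
--     """
--     if type_name in _PRIM:
--         fmt, size = _PRIM[type_name]
--         return [(prefix, fmt, size)]
--     if type_name not in schemas:
--         return []
--     result = []
--     for field_name, field_type, count in schemas[type_name]:
--         sub = f"{prefix}/{field_name}" if prefix else field_name
--         if count == 1:
--             result.extend(_build_leaf_fields(field_type, schemas, sub))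
--         else:
--             for idx in range(count):
--                 result.extend(_build_leaf_fields(field_type, schemas, f"{sub}[{idx}]"))
--     return result
-- ===== SOURCE B (Python) =====
-- _PRIM: dict[str, tuple[str, int]] = {
--     "bool":   ("<B", 1),  # stored as uint8
--     "char":   ("<B", 1),
--     "int8":   ("<b", 1),
--     "uint8":  ("<B", 1),
--     "int16":  ("<h", 2),
--     "uint16": ("<H", 2),
--     "int32":  ("<i", 4),
--     "uint32": ("<I", 4),
--     "int64":  ("<q", 8),
--     "uint64": ("<Q", 8),
--     "float":  ("<f", 4),
--     "double": ("<d", 8),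
-- }
--
--
-- def _expand_field(pre, field_name, field_type, count):
--     sub = f"{pre}/{field_name}" if pre else field_name
--     if count == 1:
--         return [(field_type, sub)]
--     return [(field_type, f"{sub}[{idx}]") for idx in range(count)]
--
--
-- def _build_leaf_fields(
--     type_name: str,
--     schemas: dict[str, list[tuple[str, str, int]]],
--     prefix: str = "",
-- ) -> list[tuple[str, str, int]]:
--     """Iterative DFS with an explicit worklist instead of recursion."""
--     result = []
--     stack = [(type_name, prefix)]
--     while stack:
--         t, pre = stack.pop()
--         if t in _PRIM:
--             fmt, size = _PRIM[t]
--             result.append((pre, fmt, size))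
--             continue
--         if t not in schemas:
--             continue
--         items = [item
--                  for field_name, field_type, count in schemas[t]
--                  for item in _expand_field(pre, field_name, field_type, count)]
--         stack.extend(reversed(items))
--     return result
-- ===== Notes on version B (the rewrite author's own statement) =====
-- stated objective: alternative
-- what changed: Replaces A's recursive expansion with an iterative DFS over an explicit worklist stack: entries are (type, prefix) pairs, children (with count>1 expanded into indexed prefixes) are pushed in reversed order so popping reproduces A's left-to-right pre-order, and leaves are appended when popped.
import Mathlib
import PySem

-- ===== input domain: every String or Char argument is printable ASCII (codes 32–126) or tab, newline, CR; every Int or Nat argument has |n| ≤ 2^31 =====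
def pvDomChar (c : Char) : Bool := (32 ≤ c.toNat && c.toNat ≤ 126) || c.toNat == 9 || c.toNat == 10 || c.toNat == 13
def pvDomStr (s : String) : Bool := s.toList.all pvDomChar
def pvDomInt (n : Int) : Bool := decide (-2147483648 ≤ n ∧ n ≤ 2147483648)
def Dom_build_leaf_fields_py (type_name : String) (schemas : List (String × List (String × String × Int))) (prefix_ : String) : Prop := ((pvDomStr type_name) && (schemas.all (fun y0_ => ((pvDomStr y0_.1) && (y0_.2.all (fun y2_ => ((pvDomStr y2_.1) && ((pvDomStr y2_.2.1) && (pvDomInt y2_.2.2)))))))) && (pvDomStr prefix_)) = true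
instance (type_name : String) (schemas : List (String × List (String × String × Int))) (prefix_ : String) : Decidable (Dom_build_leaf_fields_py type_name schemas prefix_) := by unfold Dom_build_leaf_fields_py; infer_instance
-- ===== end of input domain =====

-- B replaces A's recursion by an iterative DFS over an explicit worklist stack (same output, same cost).
-- Both ports carry Nat fuels (a depth budget of schemas.length+1 and, for B's while-loop, a pop budget)
-- purely as totality devices; on inputs satisfying Pre_ (no reachable schema cycle) they are never exhausted.

-- ===== PORT A =====
-- the module constant _PRIM (a dict literal)
def pvPrim : PySem.Dict String (String × Int) := PySem.Dict.ofList
  [("bool", ("<B", 1)), ("char", ("<B", 1)), ("int8", ("<b", 1)), ("uint8", ("<B", 1)),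
   ("int16", ("<h", 2)), ("uint16", ("<H", 2)), ("int32", ("<i", 4)), ("uint32", ("<I", 4)),
   ("int64", ("<q", 8)), ("uint64", ("<Q", 8)), ("float", ("<f", 4)), ("double", ("<d", 8))]

-- A's recursion, with a depth fuel (totality only; the recursion depth is ≤ schemas.length + 1 under Pre_)
def pvBlfA (schemas : List (String × List (String × String × Int))) : Nat → String → String → List (String × String × Int)
  | 0, _, _ => []
  | Nat.succ f, t, pre =>
    match pvPrim.get? t with
    | some fs => [(pre, fs.1, fs.2)]
    | none =>
      match (PySem.Dict.ofList schemas).get? t with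
      | none => []
      | some fields =>
        fields.foldl (fun result fld =>
          if fld.2.2 == 1 then
            result ++ pvBlfA schemas f fld.2.1 (if pre ≠ "" then pre ++ "/" ++ fld.1 else fld.1)
          else
            (PySem.List.pyRange 0 fld.2.2 1).foldl
              (fun r idx => r ++ pvBlfA schemas f fld.2.1
                ((if pre ≠ "" then pre ++ "/" ++ fld.1 else fld.1) ++ "[" ++ PySem.Int.toStr idx ++ "]")) result) []

def build_leaf_fields_py (type_name : String) (schemas : List (String × List (String × String × Int))) (prefix_ : String) : List (String × String × Int) :=
  pvBlfA schemas (schemas.length + 1) type_name prefix_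

-- ===== PORT B =====
-- Source B's helper _expand_field
def pvExpandField (pre fn ft : String) (count : Int) : List (String × String) :=
  let sub := if pre ≠ "" then pre ++ "/" ++ fn else fn
  if count == 1 then [(ft, sub)]
  else (PySem.List.pyRange 0 count 1).map (fun idx => (ft, sub ++ "[" ++ PySem.Int.toStr idx ++ "]"))

-- exact pop budget for the while-loop fuel (number of worklist pops; totality device only)
def pvSizeB (schemas : List (String × List (String × String × Int))) : Nat → String → Nat
  | 0, _ => 1
  | Nat.succ f, t =>
    match pvPrim.get? t with
    | some _ => 1
    | none =>
      match (PySem.Dict.ofList schemas).get? t with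
      | none => 1
      | some fields =>
        1 + ((fields.flatMap (fun fld => pvExpandField "" fld.1 fld.2.1 fld.2.2)).map
              (fun it => pvSizeB schemas f it.1)).sum

-- Source B's while-loop: stack head = Python's stack top; 'stack.extend(reversed(items))' = items ++ rest.
-- Each entry carries its remaining depth budget (totality device, as in port A).
def pvBlfBLoop (schemas : List (String × List (String × String × Int))) : Nat → List (Nat × String × String) → List (String × String × Int) → List (String × String × Int)
  | _, [], result => result
  | 0, _ :: _, result => result
  | Nat.succ g, (0, _, _) :: rest, result => pvBlfBLoop schemas g rest result
  | Nat.succ g, (Nat.succ f, t, pre) :: rest, result =>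
    match pvPrim.get? t with
    | some fs => pvBlfBLoop schemas g rest (result ++ [(pre, fs.1, fs.2)])
    | none =>
      match (PySem.Dict.ofList schemas).get? t with
      | none => pvBlfBLoop schemas g rest result
      | some fields =>
        pvBlfBLoop schemas g
          (((fields.flatMap (fun fld => pvExpandField pre fld.1 fld.2.1 fld.2.2)).map
              (fun it => (f, it.1, it.2))) ++ rest)
          result

def build_leaf_fields_py_alt (type_name : String) (schemas : List (String × List (String × String × Int))) (prefix_ : String) : List (String × String × Int) :=
  pvBlfBLoop schemas (pvSizeB schemas (schemas.length + 1) type_name)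
    [((schemas.length + 1), type_name, prefix_)] []

-- ===== PRECONDITION & SPEC =====
-- graph of type references: t → u when u is the type of a field of t's schema with count ≥ 1 (count ≤ 0 fields are never recursed into; primitive types are leaves)
def pvSuccs (schemas : List (String × List (String × String × Int))) (t : String) : List String :=
  match pvPrim.get? t with
  | some _ => []
  | none =>
    match (PySem.Dict.ofList schemas).get? t with
    | none => []
    | some fields => fields.filterMap (fun fld => if 1 ≤ fld.2.2 then some fld.2.1 else none)

-- nodes reachable from the start set in ≤ k further steps
def pvReach (schemas : List (String × List (String × String × Int))) : Nat → List String → List String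
  | 0, S => S
  | Nat.succ k, S => pvReach schemas k ((S ++ S.flatMap (pvSuccs schemas)).dedup)

-- Pre_ excludes schemas with a type-reference cycle reachable from type_name: there Python A raises
-- RecursionError (it returns everywhere else in the domain).
def Pre_build_leaf_fields_py (type_name : String) (schemas : List (String × List (String × String × Int))) (prefix_ : String) : Prop :=
  ∀ u ∈ type_name :: pvReach schemas (schemas.length + 2) (pvSuccs schemas type_name),
    u ∉ pvReach schemas (schemas.length + 2) (pvSuccs schemas u)
instance (type_name : String) (schemas : List (String × List (String × String × Int))) (prefix_ : String) : Decidable (Pre_build_leaf_fields_py type_name schemas prefix_) := by unfold Pre_build_leaf_fields_py; infer_instance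

def pvWitness_build_leaf_fields_py : String × (List (String × List (String × String × Int))) × String :=
  ("pose", [("pose", [("x", "double", 1), ("tags", "int32", 3)])], "")

def Spec_build_leaf_fields_py (type_name : String) (schemas : List (String × List (String × String × Int))) (prefix_ : String) (out : List (String × String × Int)) : Prop := out = build_leaf_fields_py_alt type_name schemas prefix_
instance (type_name : String) (schemas : List (String × List (String × String × Int))) (prefix_ : String) (out : List (String × String × Int)) : Decidable (Spec_build_leaf_fields_py type_name schemas prefix_ out) := by unfold Spec_build_leaf_fields_py; infer_instance

-- ===== CLAIM (what is proved, stated in full; the proofs are below) =====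
def Claim_equal_build_leaf_fields_py : Prop := ∀ (type_name : String) (schemas : List (String × List (String × String × Int))) (prefix_ : String), Dom_build_leaf_fields_py type_name schemas prefix_ → Pre_build_leaf_fields_py type_name schemas prefix_ → Spec_build_leaf_fields_py type_name schemas prefix_ (build_leaf_fields_py type_name schemas prefix_)

-- ===== LEMMAS AND PROOFS =====

theorem pvWitness_ok :
    Dom_build_leaf_fields_py pvWitness_build_leaf_fields_py.1 pvWitness_build_leaf_fields_py.2.1 pvWitness_build_leaf_fields_py.2.2 ∧
    Pre_build_leaf_fields_py pvWitness_build_leaf_fields_py.1 pvWitness_build_leaf_fields_py.2.1 pvWitness_build_leaf_fields_py.2.2 := by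
  decide

-- the per-item summand of pvSizeB does not depend on the prefix used in pvExpandField
theorem pvExpandField_map_fst {α : Type} (pre fn ft : String) (c : Int) (g : String → α) :
    (pvExpandField pre fn ft c).map (fun it => g it.1)
      = (pvExpandField "" fn ft c).map (fun it => g it.1) := by
  simp [pvExpandField]
  split <;> simp

theorem pvExpandAll_map_fst {α : Type} (pre : String) (fields : List (String × String × Int)) (g : String → α) :
    fields.flatMap (fun a => (pvExpandField pre a.1 a.2.1 a.2.2).map (fun it => g it.1))
      = fields.flatMap (fun a => (pvExpandField "" a.1 a.2.1 a.2.2).map (fun it => g it.1)) := by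
  induction fields with
  | nil => rfl
  | cons fld rest ih =>
    simp only [List.flatMap_cons, pvExpandField_map_fst]

theorem pvSizeB_pos (schemas : List (String × List (String × String × Int))) (f : Nat) (t : String) :
    1 ≤ pvSizeB schemas f t := by
  cases f with
  | zero => simp [pvSizeB]
  | succ f =>
    simp only [pvSizeB]
    split
    · omega
    · split <;> omega

-- A's loop body, rewritten as a flatMap over the expanded (type, prefix) items
theorem pvBlfA_succ_expand (schemas : List (String × List (String × String × Int)))
    (f : Nat) (t pre : String) (fields : List (String × String × Int))
    (hp : pvPrim.get? t = none) (hs : (PySem.Dict.ofList schemas).get? t = some fields) :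
    pvBlfA schemas (f + 1) t pre
      = (fields.flatMap (fun fld => pvExpandField pre fld.1 fld.2.1 fld.2.2)).flatMap
          (fun it => pvBlfA schemas f it.1 it.2) := by
  simp only [pvBlfA, hp, hs]
  have hstep : ∀ (result : List (String × String × Int)) (fld : String × String × Int),
      (if fld.2.2 == 1 then
        result ++ pvBlfA schemas f fld.2.1 (if pre ≠ "" then pre ++ "/" ++ fld.1 else fld.1)
      else
        (PySem.List.pyRange 0 fld.2.2 1).foldl
          (fun r idx => r ++ pvBlfA schemas f fld.2.1
            ((if pre ≠ "" then pre ++ "/" ++ fld.1 else fld.1) ++ "[" ++ PySem.Int.toStr idx ++ "]")) result)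
      = result ++ (pvExpandField pre fld.1 fld.2.1 fld.2.2).flatMap (fun it => pvBlfA schemas f it.1 it.2) := by
    intro result fld
    by_cases h : fld.2.2 == 1
    · simp [h, pvExpandField]
    · simp only [h]
      rw [PySem.List.foldl_append_eq_flatMap]
      simp [pvExpandField, h, List.flatMap_map]
  calc fields.foldl (fun result fld =>
        if fld.2.2 == 1 then
          result ++ pvBlfA schemas f fld.2.1 (if pre ≠ "" then pre ++ "/" ++ fld.1 else fld.1)
        else
          (PySem.List.pyRange 0 fld.2.2 1).foldl
            (fun r idx => r ++ pvBlfA schemas f fld.2.1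
              ((if pre ≠ "" then pre ++ "/" ++ fld.1 else fld.1) ++ "[" ++ PySem.Int.toStr idx ++ "]")) result) []
      = fields.foldl (fun result fld =>
          result ++ (pvExpandField pre fld.1 fld.2.1 fld.2.2).flatMap (fun it => pvBlfA schemas f it.1 it.2)) [] := by
        congr 1
        funext result fld
        exact hstep result fld
    _ = _ := by
        rw [PySem.List.foldl_append_eq_flatMap]
        simp [List.flatMap_assoc]

-- pvSizeB, restated with an arbitrary prefix in the expansion
theorem pvSizeB_succ_expand (schemas : List (String × List (String × String × Int)))
    (f : Nat) (t pre : String) (fields : List (String × String × Int))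
    (hp : pvPrim.get? t = none) (hs : (PySem.Dict.ofList schemas).get? t = some fields) :
    pvSizeB schemas (f + 1) t
      = 1 + ((fields.flatMap (fun fld => pvExpandField pre fld.1 fld.2.1 fld.2.2)).map
              (fun it => pvSizeB schemas f it.1)).sum := by
  simp only [pvSizeB, hp, hs, List.map_flatMap]
  rw [pvExpandAll_map_fst pre fields (pvSizeB schemas f)]

-- the worklist invariant: with enough pop budget, the loop appends the concatenated A-results of the stack
theorem pvBlfBLoop_eq (schemas : List (String × List (String × String × Int))) :
    ∀ (g : Nat) (stack : List (Nat × String × String)) (result : List (String × String × Int)),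
      (stack.map (fun e => pvSizeB schemas e.1 e.2.1)).sum ≤ g →
      pvBlfBLoop schemas g stack result
        = result ++ stack.flatMap (fun e => pvBlfA schemas e.1 e.2.1 e.2.2) := by
  intro g
  induction g with
  | zero =>
    intro stack result h
    cases stack with
    | nil => simp [pvBlfBLoop]
    | cons e rest =>
      exfalso
      have := pvSizeB_pos schemas e.1 e.2.1
      simp at h
      omega
  | succ g ih =>
    intro stack result h
    cases stack with
    | nil => simp [pvBlfBLoop]
    | cons e rest =>
      obtain ⟨f, t, pre⟩ := e
      simp only [List.map_cons, List.sum_cons] at h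
      cases f with
      | zero =>
        have hr : (rest.map (fun e => pvSizeB schemas e.1 e.2.1)).sum ≤ g := by
          have := pvSizeB_pos schemas 0 t
          simp [pvSizeB] at h ⊢
          omega
        simp only [pvBlfBLoop]
        rw [ih rest result hr]
        simp [pvBlfA]
      | succ f =>
        cases hp : pvPrim.get? t with
        | some fs =>
          have hsz : pvSizeB schemas (f + 1) t = 1 := by simp [pvSizeB, hp]
          have hr : (rest.map (fun e => pvSizeB schemas e.1 e.2.1)).sum ≤ g := by
            rw [hsz] at h; omega
          simp only [pvBlfBLoop, hp]
          rw [ih rest (result ++ [(pre, fs.1, fs.2)]) hr]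
          simp [pvBlfA, hp]
        | none =>
          cases hs : (PySem.Dict.ofList schemas).get? t with
          | none =>
            have hsz : pvSizeB schemas (f + 1) t = 1 := by simp [pvSizeB, hp, hs]
            have hr : (rest.map (fun e => pvSizeB schemas e.1 e.2.1)).sum ≤ g := by
              rw [hsz] at h; omega
            simp only [pvBlfBLoop, hp, hs]
            rw [ih rest result hr]
            simp [pvBlfA, hp, hs]
          | some fields =>
            have hsz := pvSizeB_succ_expand schemas f t pre fields hp hs
            have hmap : (((fields.flatMap (fun fld => pvExpandField pre fld.1 fld.2.1 fld.2.2)).map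
                  (fun it => (f, it.1, it.2))).map (fun e => pvSizeB schemas e.1 e.2.1))
                = (fields.flatMap (fun fld => pvExpandField pre fld.1 fld.2.1 fld.2.2)).map
                  (fun it => pvSizeB schemas f it.1) := by
              simp
            have hstk : ((((fields.flatMap (fun fld => pvExpandField pre fld.1 fld.2.1 fld.2.2)).map
                  (fun it => (f, it.1, it.2))) ++ rest).map (fun e => pvSizeB schemas e.1 e.2.1)).sum ≤ g := by
              rw [List.map_append, List.sum_append, hmap]
              omega
            simp only [pvBlfBLoop, hp, hs]
            rw [ih _ result hstk]
            rw [List.flatMap_append, List.flatMap_cons,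
              pvBlfA_succ_expand schemas f t pre fields hp hs]
            simp [List.flatMap_map]

-- ===== VERDICT (by name: the statement is the Claim_ definition above) =====
theorem build_leaf_fields_py_spec : Claim_equal_build_leaf_fields_py := by
  intro type_name schemas prefix_ _ _
  unfold Spec_build_leaf_fields_py build_leaf_fields_py build_leaf_fields_py_alt
  rw [pvBlfBLoop_eq schemas _ [((schemas.length + 1), type_name, prefix_)] [] (by simp)]
  simp
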